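-- pv_equiv track=rewrite | github.com/MTHZ-01/Auto-software-installer-for-windows- | Assets.py | app_name
-- ===== SOURCE A (Python) =====
-- def app_name(link: str) -> str:
--     link = link.split('/')[-1]
--     name = ''
--     for char in link:
--         if 48 <= ord(char) <= 57:
--             break
--         name += char
--     return name.strip('.').replace('.', '').replace('-', '').replace('_', '')
-- ===== SOURCE B (Python) =====
-- def app_name(link: str) -> str:
--     # One-pass state machine over the whole URL: no split, no post-processing.
--     # The accumulator and the "saw a digit" flag reset at every '/', so at the
--     # end `acc` holds exactly the filtered digit-free prefix of the last segment.
--     acc = ''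
--     stopped = False
--     for ch in link:
--         if ch == '/':
--             acc = ''
--             stopped = False
--         elif stopped:
--             pass
--         elif '0' <= ch <= '9':
--             stopped = True
--         elif ch == '.' or ch == '-' or ch == '_':
--             pass
--         else:
--             acc += ch
--     return acc
-- ===== Notes on version B (the rewrite author's own statement) =====
-- stated objective: alternative
-- what changed: A splits the URL on '/', takes the last segment, builds its prefix up to the first digit, then post-processes with strip('.') and three chained replace passes; B never splits: it is a single-pass state machine over the whole URL whose accumulator and digit-stop flag reset at each '/', filtering '.', '-', '_' on the fly.
import Mathlib
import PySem

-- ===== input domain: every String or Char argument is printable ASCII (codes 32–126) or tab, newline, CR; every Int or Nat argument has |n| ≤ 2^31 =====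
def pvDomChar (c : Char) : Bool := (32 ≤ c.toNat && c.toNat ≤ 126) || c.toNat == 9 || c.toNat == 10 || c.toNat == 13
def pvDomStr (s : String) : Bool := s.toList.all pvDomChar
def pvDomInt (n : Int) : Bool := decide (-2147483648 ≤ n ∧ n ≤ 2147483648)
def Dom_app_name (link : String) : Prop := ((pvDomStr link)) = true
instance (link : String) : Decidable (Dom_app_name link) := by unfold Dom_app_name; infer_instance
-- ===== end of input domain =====

-- B replaces A's split/prefix/strip/replace pipeline by one state machine over the
-- whole URL (accumulator and digit-stop flag reset at each '/'): an alternative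
-- single-pass decomposition, not claimed faster.

-- ===== PORT A =====

-- `for char in link: if 48 <= ord(char) <= 57: break; name += char`
def appNamePrefA : List Char → List Char
  | [] => []
  | c :: rest => if 48 ≤ c.toNat ∧ c.toNat ≤ 57 then [] else c :: appNamePrefA rest

def app_name (link : String) : String :=
  -- link.split('/')[-1]; the split result is never empty, so [-1] cannot raise
  let seg := (PySem.List.pyGet? (PySem.Chars.splitOn link.toList ['/']) (-1)).getD []
  let name := appNamePrefA seg
  String.ofList (PySem.Chars.replace (PySem.Chars.replace (PySem.Chars.replace
    (PySem.Chars.stripChars name ['.']) ['.'] []) ['-'] []) ['_'] [])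

-- ===== PORT B =====

-- Source B's loop: state (acc, stopped); '/' resets both, a digit sets stopped,
-- '.', '-', '_' are skipped, anything else is appended (while not stopped).
def appNameGoB : List Char → List Char → Bool → List Char
  | [], acc, _ => acc
  | c :: rest, acc, stopped =>
      if c = '/' then appNameGoB rest [] false
      else if stopped then appNameGoB rest acc stopped
      else if '0' ≤ c ∧ c ≤ '9' then appNameGoB rest acc true
      else if c = '.' ∨ c = '-' ∨ c = '_' then appNameGoB rest acc stopped
      else appNameGoB rest (acc ++ [c]) stopped

def app_name_alt (link : String) : String :=
  String.ofList (appNameGoB link.toList [] false)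

-- ===== PRECONDITION & SPEC =====
def Spec_app_name (link : String) (out : String) : Prop := out = app_name_alt link
instance (link : String) (out : String) : Decidable (Spec_app_name link out) := by unfold Spec_app_name; infer_instance

-- ===== CLAIM (what is proved, stated in full; the proofs are below) =====
def Claim_equal_app_name : Prop := ∀ (link : String), Dom_app_name link → Spec_app_name link (app_name link)

-- ===== LEMMAS AND PROOFS =====

-- the last segment of l split on '/' (left-fold formulation used by both proofs)
def lastSegRec : List Char → List Char → List Char
  | [], cur => cur
  | c :: t, cur => if c = '/' then lastSegRec t [] else lastSegRec t (cur ++ [c])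

-- the filtered digit-bounded prefix of one slash-free segment
def appNameFiltB : List Char → List Char
  | [] => []
  | c :: rest =>
      if '0' ≤ c ∧ c ≤ '9' then []
      else if c = '.' ∨ c = '-' ∨ c = '_' then appNameFiltB rest
      else c :: appNameFiltB rest

-- A's digit test `48 <= ord(c) <= 57` and B's `'0' <= c <= '9'` agree
theorem digit_iff (c : Char) : ('0' ≤ c ∧ c ≤ '9') ↔ (48 ≤ c.toNat ∧ c.toNat ≤ 57) := by
  rw [Char.le_def, Char.le_def, UInt32.le_iff_toNat_le, UInt32.le_iff_toNat_le]
  exact Iff.rfl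

-- replace.go with enough fuel, old = [d], new = [] is a filter
theorem replace_go_filter (d : Char) :
    ∀ (l : List Char) (fuel : Nat) (acc : List Char), l.length ≤ fuel →
      PySem.Chars.replace.go [d] [] fuel l acc = acc.reverse ++ l.filter (fun c => !(c == d)) := by
  intro l
  induction l with
  | nil =>
      intro fuel acc _
      cases fuel <;> simp [PySem.Chars.replace.go]
  | cons c t ih =>
      intro fuel acc h
      cases fuel with
      | zero => simp at h
      | succ f =>
          have ht : t.length ≤ f := by simpa using h
          by_cases hc : c = d
          · subst hc
            simp only [PySem.Chars.replace.go]
            simp [List.isPrefixOf, ih _ _ ht]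
          · have hdc : ¬ d = c := fun h' => hc h'.symm
            simp only [PySem.Chars.replace.go]
            simp [List.isPrefixOf, hdc, hc, ih _ _ ht]

-- s.replace(d, '') is a filter
theorem replace_single_nil (d : Char) (s : List Char) :
    PySem.Chars.replace s [d] [] = s.filter (fun c => !(c == d)) := by
  simpa using replace_go_filter d s s.length [] le_rfl

-- filtering away '.' commutes over dropping leading '.'s
theorem filter_dropWhile_dot (s : List Char) :
    (List.dropWhile (fun c => (['.'] : List Char).contains c) s).filter (fun c => !(c == '.'))
      = s.filter (fun c => !(c == '.')) := by
  induction s with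
  | nil => simp
  | cons c t ih =>
      by_cases hc : c = '.' <;> simp_all [List.dropWhile]

-- strip('.') is invisible to the later '.'-removing replace
theorem filter_stripChars_dot (s : List Char) :
    (PySem.Chars.stripChars s ['.']).filter (fun c => !(c == '.'))
      = s.filter (fun c => !(c == '.')) := by
  simp only [PySem.Chars.stripChars, List.filter_reverse, filter_dropWhile_dot,
    List.reverse_reverse]

-- A's post-processing of the digit-bounded prefix of a segment = the filtered pass
theorem phase2_eq (cs : List Char) :
    PySem.Chars.replace (PySem.Chars.replace (PySem.Chars.replace
      (PySem.Chars.stripChars (appNamePrefA cs) ['.']) ['.'] []) ['-'] []) ['_'] []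
    = appNameFiltB cs := by
  simp only [replace_single_nil, filter_stripChars_dot, List.filter_filter]
  induction cs with
  | nil => simp [appNamePrefA, appNameFiltB]
  | cons c t ih =>
      by_cases hd : 48 ≤ c.toNat ∧ c.toNat ≤ 57
      · have hd' : '0' ≤ c ∧ c ≤ '9' := (digit_iff c).mpr hd
        simp [appNamePrefA, appNameFiltB, hd, hd']
      · have hd' : ¬ ('0' ≤ c ∧ c ≤ '9') := fun h' => hd ((digit_iff c).mp h')
        by_cases hs : c = '.' ∨ c = '-' ∨ c = '_'
        · rcases hs with h | h | h <;> subst h <;>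
            simp [appNamePrefA, appNameFiltB, hd, ih]
        · rcases not_or.mp hs with ⟨h1, h23⟩
          rcases not_or.mp h23 with ⟨h2, h3⟩
          simp [appNamePrefA, appNameFiltB, hd, hd', h1, h2, h3, ih]

-- splitOn's last element is lastSegRec
theorem splitOn_go_getLast (l : List Char) :
    ∀ (fuel : Nat) (cur : List Char) (acc : List (List Char)), l.length ≤ fuel →
      (PySem.Chars.splitOn.go ['/'] fuel l cur acc).getLast? = some (lastSegRec l cur.reverse) := by
  induction l with
  | nil =>
      intro fuel cur acc _
      cases fuel <;> simp [PySem.Chars.splitOn.go, lastSegRec]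
  | cons c t ih =>
      intro fuel cur acc h
      cases fuel with
      | zero => simp at h
      | succ f =>
          have ht : t.length ≤ f := by simpa using h
          by_cases hc : c = '/'
          · subst hc
            simp only [PySem.Chars.splitOn.go]
            simp [List.isPrefixOf, ih f [] _ ht, lastSegRec]
          · have h' : ¬ ('/' : Char) = c := fun e => hc e.symm
            simp only [PySem.Chars.splitOn.go]
            simpa [List.isPrefixOf, h', hc, lastSegRec] using ih f (c :: cur) acc ht
  termination_by l.length

theorem splitOn_last (l : List Char) :
    (PySem.List.pyGet? (PySem.Chars.splitOn l ['/']) (-1)).getD [] = lastSegRec l [] := by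
  have := splitOn_go_getLast l (l.length + 1) [] [] (by omega)
  simp [PySem.Chars.splitOn, PySem.List.pyGet?_neg_one, this]

theorem lastSegRec_no_slash (t : List Char) (cur : List Char) (h : ('/' : Char) ∉ t) :
    lastSegRec t cur = cur ++ t := by
  induction t generalizing cur with
  | nil => simp [lastSegRec]
  | cons c r ih =>
      have hc : c ≠ '/' := fun e => h (e ▸ List.mem_cons_self)
      have hr : ('/' : Char) ∉ r := fun m => h (List.mem_cons_of_mem _ m)
      simp [lastSegRec, hc, ih _ hr]

theorem lastSegRec_slash (t : List Char) (cur : List Char) (h : ('/' : Char) ∈ t) :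
    lastSegRec t cur = lastSegRec t [] := by
  induction t generalizing cur with
  | nil => simp at h
  | cons c r ih =>
      by_cases hc : c = '/'
      · simp [lastSegRec, hc]
      · have hr : ('/' : Char) ∈ r := by
          rcases List.mem_cons.mp h with e | m
          · exact absurd e.symm hc
          · exact m
        simp [lastSegRec, hc, ih _ hr, ih [c] hr]

-- B's state machine evaluated on one input:
-- no slash left: it finishes the current segment (acc, stopped);
-- slash left: the result only depends on the part after the last slash.
theorem appNameGoB_spec (l : List Char) :
    ∀ (acc : List Char) (stopped : Bool),
      appNameGoB l acc stopped =
        if ('/' : Char) ∈ l then appNameFiltB (lastSegRec l [])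
        else if stopped then acc else acc ++ appNameFiltB l := by
  induction l with
  | nil => intro acc stopped; simp [appNameGoB, appNameFiltB]
  | cons c t ih =>
      intro acc stopped
      by_cases hc : c = '/'
      · subst hc
        by_cases hm : ('/' : Char) ∈ t
        · simp [appNameGoB, ih, hm, lastSegRec]
        · simp [appNameGoB, ih, hm, lastSegRec, lastSegRec_no_slash t [] hm]
      · by_cases hm : ('/' : Char) ∈ t
        · have hmem : ('/' : Char) ∈ c :: t := List.mem_cons_of_mem _ hm
          have hlast : ∀ cur, lastSegRec t cur = lastSegRec t [] :=
            fun cur => lastSegRec_slash t cur hm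
          simp only [appNameGoB, lastSegRec, hc, if_false, if_neg hc, hmem, if_pos hmem]
          split_ifs <;> simp [ih, hm, hlast]
        · have hmem : ('/' : Char) ∉ c :: t := by
            intro h; rcases List.mem_cons.mp h with e | m
            · exact hc e.symm
            · exact hm m
          by_cases hst : stopped = true
          · subst hst
            simp [appNameGoB, hc, ih, hm, hmem]
          · have hst' : stopped = false := by simpa using hst
            subst hst'
            by_cases hd : '0' ≤ c ∧ c ≤ '9'
            · simp [appNameGoB, hc, hd, ih, hm, hmem, appNameFiltB]
            · by_cases hs : c = '.' ∨ c = '-' ∨ c = '_'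
              · simp [appNameGoB, hc, hd, hs, ih, hm, hmem, appNameFiltB]
              · simp [appNameGoB, hc, hd, hs, ih, hm, hmem, appNameFiltB]

-- ===== VERDICT (by name: the statement is the Claim_ definition above) =====
theorem app_name_spec : Claim_equal_app_name := by
  intro link _
  unfold Spec_app_name
  simp only [app_name, app_name_alt, splitOn_last, phase2_eq, appNameGoB_spec]
  by_cases hm : ('/' : Char) ∈ link.toList
  · simp [hm]
  · simp [hm, lastSegRec_no_slash link.toList [] hm]
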